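-- pv_equiv track=rewrite | github.com/circadiancity/agentmy | medical_task_suite/evaluation/red_line_detector.py | _check_context_requirements
-- ===== SOURCE A (Python) =====
-- from typing import Dict, List, Any, Optional
--
-- def _check_context_requirements(
--
--     requirements: List[str],
--     conversation_history: List[Dict],
--     task_context: Dict
-- ) -> bool:
--     """Check if context requirements are met."""
--     # This is a simplified implementation
--     # In production, would use more sophisticated context analysis
--
--     if not conversation_history:
--         # If no history, can't verify context requirements
--         # Assume they're NOT met (conservative approach)
--         return False
--
--     # Check for specific indicators in conversation history
--     for requirement in requirements:
--         requirement_lower = requirement.lower()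
--
--         # Look for requirement in conversation
--         found = False
--         for turn in conversation_history:
--             role = turn.get('role', '')
--             content = turn.get('content', '')
--
--             if 'patient' in role or 'user' in role:
--                 # Check if patient provided the information
--                 if requirement_lower in content.lower():
--                     found = True
--                     break
--
--         if not found:
--             return False
--
--     return True
-- ===== SOURCE B (Python) =====
-- def _check_context_requirements(
--     requirements,
--     conversation_history,
--     task_context
-- ) -> bool:
--     """Single pass over the conversation, maintaining the set of still-unmet requirements."""
--     if not conversation_history:
--         return False
--     remaining = {r.lower() for r in requirements}
--     for turn in conversation_history:
--         role = turn.get('role', '')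
--         if 'patient' in role or 'user' in role:
--             content = turn.get('content', '').lower()
--             remaining = {r for r in remaining if r not in content}
--             if not remaining:
--                 return True
--     return not remaining
-- ===== Notes on version B (the rewrite author's own statement) =====
-- stated objective: alternative
-- what changed: Inverts the loop nesting: instead of scanning all turns once per requirement, B makes one pass over the turns while shrinking the set of unmet requirements, returning True as soon as it empties.
import Mathlib
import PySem

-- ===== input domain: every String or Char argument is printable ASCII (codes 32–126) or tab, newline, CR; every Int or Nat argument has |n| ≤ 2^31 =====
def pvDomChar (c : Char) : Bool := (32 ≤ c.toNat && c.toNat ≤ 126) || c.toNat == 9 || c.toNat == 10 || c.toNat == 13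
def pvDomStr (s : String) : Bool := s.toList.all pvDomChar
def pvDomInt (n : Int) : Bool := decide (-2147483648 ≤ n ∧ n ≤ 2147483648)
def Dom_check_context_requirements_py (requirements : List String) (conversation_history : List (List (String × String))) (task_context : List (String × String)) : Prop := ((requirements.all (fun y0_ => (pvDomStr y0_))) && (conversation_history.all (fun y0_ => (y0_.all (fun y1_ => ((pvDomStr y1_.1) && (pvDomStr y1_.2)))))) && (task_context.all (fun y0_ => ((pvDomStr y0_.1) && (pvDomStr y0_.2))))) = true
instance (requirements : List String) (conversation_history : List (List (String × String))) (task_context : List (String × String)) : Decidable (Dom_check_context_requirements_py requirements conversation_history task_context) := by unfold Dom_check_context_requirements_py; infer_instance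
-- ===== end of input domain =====

-- B inverts the loop nesting: one pass over the turns, shrinking the set of unmet requirements (alternative decomposition, same cost class).

-- ===== PORT A =====
-- inner loop of A: scan the turns for one (lowered) requirement, break on first hit
def pvAInner (rl : String) (turns : List (List (String × String))) : Bool :=
  match turns with
  | [] => false
  | t :: rest =>
    let role := (PySem.Dict.mk t).getD "role" ""
    let content := (PySem.Dict.mk t).getD "content" ""
    if PySem.Str.isIn "patient" role || PySem.Str.isIn "user" role then
      if PySem.Str.isIn rl (PySem.Str.lower content) then true
      else pvAInner rl rest
    else pvAInner rl rest

-- outer loop of A: over the requirements, early False when one is not found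
def pvALoop (reqs : List String) (turns : List (List (String × String))) : Bool :=
  match reqs with
  | [] => true
  | req :: rest =>
    let rl := PySem.Str.lower req
    let found := pvAInner rl turns
    if !found then false else pvALoop rest turns

def check_context_requirements_py (requirements : List String) (conversation_history : List (List (String × String))) (task_context : List (String × String)) : Bool :=
  if conversation_history = [] then false
  else pvALoop requirements conversation_history

-- ===== PORT B =====
-- B's single pass over the turns, carrying the set of still-unmet lowered requirements
def pvBLoop (turns : List (List (String × String))) (remaining : List String) : Bool :=
  match turns with
  | [] => remaining.isEmpty
  | t :: rest =>
    let role := (PySem.Dict.mk t).getD "role" ""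
    if PySem.Str.isIn "patient" role || PySem.Str.isIn "user" role then
      let content := PySem.Str.lower ((PySem.Dict.mk t).getD "content" "")
      let remaining' := remaining.filter (fun r => !(PySem.Str.isIn r content))
      if remaining'.isEmpty then true else pvBLoop rest remaining'
    else pvBLoop rest remaining

def check_context_requirements_py_alt (requirements : List String) (conversation_history : List (List (String × String))) (task_context : List (String × String)) : Bool :=
  if conversation_history = [] then false
  else pvBLoop conversation_history (PySem.Set.ofList (requirements.map PySem.Str.lower))

-- ===== PRECONDITION & SPEC =====
def Spec_check_context_requirements_py (requirements : List String) (conversation_history : List (List (String × String))) (task_context : List (String × String)) (out : Bool) : Prop := out = check_context_requirements_py_alt requirements conversation_history task_context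
instance (requirements : List String) (conversation_history : List (List (String × String))) (task_context : List (String × String)) (out : Bool) : Decidable (Spec_check_context_requirements_py requirements conversation_history task_context out) := by unfold Spec_check_context_requirements_py; infer_instance

-- ===== CLAIM (what is proved, stated in full; the proofs are below) =====
def Claim_equal_check_context_requirements_py : Prop := ∀ (requirements : List String) (conversation_history : List (List (String × String))) (task_context : List (String × String)), Dom_check_context_requirements_py requirements conversation_history task_context → Spec_check_context_requirements_py requirements conversation_history task_context (check_context_requirements_py requirements conversation_history task_context)

-- ===== LEMMAS AND PROOFS =====

-- a turn is a patient/user turn and its (lowered) content contains rl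
def pvMatched (t : List (String × String)) (rl : String) : Bool :=
  (PySem.Str.isIn "patient" ((PySem.Dict.mk t).getD "role" "")
    || PySem.Str.isIn "user" ((PySem.Dict.mk t).getD "role" ""))
  && PySem.Str.isIn rl (PySem.Str.lower ((PySem.Dict.mk t).getD "content" ""))

theorem pvAInner_eq_any (rl : String) (turns : List (List (String × String))) :
    pvAInner rl turns = turns.any (fun t => pvMatched t rl) := by
  induction turns with
  | nil => rfl
  | cons t rest ih =>
    simp only [pvAInner]
    cases hrole : (PySem.Str.isIn "patient" ((PySem.Dict.mk t).getD "role" "")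
        || PySem.Str.isIn "user" ((PySem.Dict.mk t).getD "role" "")) with
    | false =>
      have hmt : pvMatched t rl = false := by unfold pvMatched; rw [hrole, Bool.false_and]
      rw [if_neg (by simp), ih, List.any_cons, hmt, Bool.false_or]
    | true =>
      simp only [if_true]
      cases hm : PySem.Str.isIn rl (PySem.Str.lower ((PySem.Dict.mk t).getD "content" "")) with
      | true =>
        have hmt : pvMatched t rl = true := by unfold pvMatched; rw [hrole, hm, Bool.true_and]
        rw [if_pos rfl, List.any_cons, hmt, Bool.true_or]
      | false =>
        have hmt : pvMatched t rl = false := by unfold pvMatched; rw [hrole, hm, Bool.true_and]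
        rw [if_neg (by simp), ih, List.any_cons, hmt, Bool.false_or]

theorem pvALoop_eq_all (reqs : List String) (turns : List (List (String × String))) :
    pvALoop reqs turns = reqs.all (fun req => turns.any (fun t => pvMatched t (PySem.Str.lower req))) := by
  induction reqs with
  | nil => rfl
  | cons req rest ih =>
    simp only [pvALoop, pvAInner_eq_any, List.all_cons, ← ih]
    split_ifs with h <;> simp_all

theorem pvHelper_all_or (l : List String) (p q : String → Bool) :
    l.all (fun r => p r || q r) = (l.filter (fun r => !p r)).all q := by
  induction l with
  | nil => rfl
  | cons a l ih =>
    simp only [List.all_cons, List.filter_cons]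
    cases h : p a with
    | true =>
      simp only [Bool.true_or, Bool.true_and, Bool.not_true, Bool.false_eq_true, if_false]
      exact ih
    | false =>
      simp only [Bool.false_or, Bool.not_false, if_true, List.all_cons]
      rw [ih]

theorem pvBLoop_eq_all (turns : List (List (String × String))) (remaining : List String) :
    pvBLoop turns remaining = remaining.all (fun r => turns.any (fun t => pvMatched t r)) := by
  induction turns generalizing remaining with
  | nil => cases remaining <;> simp [pvBLoop]
  | cons t rest ih =>
    simp only [pvBLoop]
    by_cases hrole : (PySem.Str.isIn "patient" ((PySem.Dict.mk t).getD "role" "")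
        || PySem.Str.isIn "user" ((PySem.Dict.mk t).getD "role" "")) = true
    · have hmt : ∀ r, pvMatched t r
          = PySem.Str.isIn r (PySem.Str.lower ((PySem.Dict.mk t).getD "content" "")) := by
        intro r; unfold pvMatched; rw [hrole, Bool.true_and]
      simp only [hrole, if_true]
      split_ifs with hemp
      · symm
        simp only [List.any_cons, hmt]
        rw [pvHelper_all_or]
        rw [List.isEmpty_iff] at hemp
        rw [hemp]
        rfl
      · rw [ih]
        symm
        simp only [List.any_cons, hmt]
        rw [pvHelper_all_or]
    · simp only [Bool.not_eq_true] at hrole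
      have hmt : ∀ r, pvMatched t r = false := by
        intro r; unfold pvMatched; rw [hrole, Bool.false_and]
      rw [hrole, if_neg (by simp), ih]
      simp only [List.any_cons, hmt, Bool.false_or]

theorem pv_all_ofList_map (reqs : List String) (p : String → Bool) :
    (PySem.Set.ofList (reqs.map PySem.Str.lower)).all p
      = reqs.all (fun req => p (PySem.Str.lower req)) := by
  rw [Bool.eq_iff_iff]
  simp only [List.all_eq_true]
  constructor
  · intro h req hr
    exact h _ (by rw [PySem.Set.mem_ofList]; exact List.mem_map_of_mem hr)
  · intro h r hr
    rw [PySem.Set.mem_ofList, List.mem_map] at hr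
    obtain ⟨req, hreq, rfl⟩ := hr
    exact h req hreq

-- ===== VERDICT (by name: the statement is the Claim_ definition above) =====
theorem check_context_requirements_py_spec : Claim_equal_check_context_requirements_py := by
  intro reqs hist ctx _
  unfold Spec_check_context_requirements_py check_context_requirements_py check_context_requirements_py_alt
  split_ifs with h
  · rfl
  · rw [pvALoop_eq_all, pvBLoop_eq_all, pv_all_ofList_map]
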